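-- pv_equiv track=rewrite | github.com/chinudev/hacker | algo/string/two_characters.py | checkAlternate
-- ===== SOURCE A (Python) =====
-- def checkAlternate(string,a,b):
--     if (a == b): return False
--
--     expected=''
--     count=0
--     for char in string:
--         if char == a:
--             if expected == b: return -1
--             expected = b
--             count += 1
--         elif char == b:
--             if expected == a: return -1
--             expected = a
--             count += 1
--         else:
--             pass   # ignore other chars
--
--     return count
-- ===== SOURCE B (Python) =====
-- def checkAlternate(string, a, b):
--     if a == b:
--         return False
--     rel = [c for c in string if c == a or c == b]
--     for x, y in zip(rel, rel[1:]):
--         if x == y: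
--             return -1
--     return len(rel)
-- ===== Notes on version B (the rewrite author's own statement) =====
-- stated objective: simpler
-- what changed: Replaces A's 'expected' sentinel state machine with materializing the filtered subsequence of relevant characters and a pairwise adjacent-equality scan over it.
-- intended difference: When exactly one of a,b is the empty string and the other (a single character) occurs exactly once in string, A's '' sentinel collides with the empty pattern and A returns -1 although the single relevant character trivially alternates; B returns 1, the intended count. — e.g. on checkAlternate("x", "", "x"): A returns -1, B returns 1
-- outside the precondition, e.g. on checkAlternate('ab', 'x', 'x'): A returns False, B returns False
import Mathlib
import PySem

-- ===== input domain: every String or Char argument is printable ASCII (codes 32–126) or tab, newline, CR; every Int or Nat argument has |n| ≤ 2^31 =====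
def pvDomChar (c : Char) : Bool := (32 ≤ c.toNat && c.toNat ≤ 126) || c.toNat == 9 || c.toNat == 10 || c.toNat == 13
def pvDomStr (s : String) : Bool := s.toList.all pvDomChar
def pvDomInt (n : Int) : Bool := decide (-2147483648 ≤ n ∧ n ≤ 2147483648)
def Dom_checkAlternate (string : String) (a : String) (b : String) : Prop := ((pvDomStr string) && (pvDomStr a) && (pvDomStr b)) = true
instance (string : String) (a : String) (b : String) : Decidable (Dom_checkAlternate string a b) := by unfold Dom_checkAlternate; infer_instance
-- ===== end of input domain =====

-- B replaces A's 'expected'-sentinel state machine by materializing the filtered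
-- subsequence of relevant characters and scanning adjacent pairs (objective: simpler).
-- Python's `char == a` (1-char string vs string) is ported exactly as [c] = a.toList.


-- ===== PORT A =====
-- the for-loop with state (expected, count) and early `return -1`
def pvGoA (al bl : List Char) : List Char → List Char → Int → Int
  | [], _, count => count
  | c :: rest, expected, count =>
    if [c] = al then
      if expected = bl then -1 else pvGoA al bl rest bl (count + 1)
    else if [c] = bl then
      if expected = al then -1 else pvGoA al bl rest al (count + 1)
    else pvGoA al bl rest expected count

-- Python returns False (== 0) when a == b; that input is excluded by Pre_ (non-int return).
def checkAlternate (string : String) (a : String) (b : String) : Int :=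
  if a.toList = b.toList then 0
  else pvGoA a.toList b.toList string.toList [] 0

-- ===== PORT B =====
-- `for x, y in zip(rel, rel[1:]): if x == y: return -1`
def pvHasAdjEq : List Char → Bool
  | c :: d :: rest => c == d || pvHasAdjEq (d :: rest)
  | _ => false

def checkAlternate_alt (string : String) (a : String) (b : String) : Int :=
  if a.toList = b.toList then 0
  else
    let rel := string.toList.filter (fun c => [c] == a.toList || [c] == b.toList)
    if pvHasAdjEq rel then -1 else (rel.length : Int)

-- ===== PRECONDITION & SPEC =====
-- Pre_ excludes exactly a == b, where Python A returns the bool False instead of an int.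
def Pre_checkAlternate (string : String) (a : String) (b : String) : Prop := a.toList ≠ b.toList
instance (string : String) (a : String) (b : String) : Decidable (Pre_checkAlternate string a b) := by unfold Pre_checkAlternate; infer_instance
def pvWitness_checkAlternate : String × String × String := ("abab", "a", "b")

-- When exactly one of a,b is "" and the other occurs, as a single character, exactly once
-- in string, A's '' sentinel collides with the empty pattern and A returns -1 although a
-- single relevant character trivially alternates; B returns 1, the intended count.
def D_checkAlternate (string : String) (a : String) (b : String) : Prop :=
  (a.toList = [] ∧ (string.toList.filter (fun c => [c] == b.toList)).length = 1)
  ∨ (b.toList = [] ∧ (string.toList.filter (fun c => [c] == a.toList)).length = 1)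
instance (string : String) (a : String) (b : String) : Decidable (D_checkAlternate string a b) := by unfold D_checkAlternate; infer_instance

def Spec_checkAlternate (string : String) (a : String) (b : String) (out : Int) : Prop :=
  ¬ D_checkAlternate string a b → out = checkAlternate_alt string a b
instance (string : String) (a : String) (b : String) (out : Int) : Decidable (Spec_checkAlternate string a b out) := by unfold Spec_checkAlternate; infer_instance

def pvDiffWitness_checkAlternate : String × String × String := ("x", "", "x")
def pvDiffWitnessOut_checkAlternate : Int × Int := (-1, 1)

-- ===== CLAIM (what is proved, stated in full; the proofs are below) =====
def Claim_unchanged_checkAlternate : Prop := ∀ (string : String) (a : String) (b : String), Dom_checkAlternate string a b → Pre_checkAlternate string a b → Spec_checkAlternate string a b (checkAlternate string a b)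
def Claim_changed_checkAlternate : Prop := Dom_checkAlternate (pvDiffWitness_checkAlternate.1) (pvDiffWitness_checkAlternate.2.1) (pvDiffWitness_checkAlternate.2.2) ∧ Pre_checkAlternate (pvDiffWitness_checkAlternate.1) (pvDiffWitness_checkAlternate.2.1) (pvDiffWitness_checkAlternate.2.2) ∧ D_checkAlternate (pvDiffWitness_checkAlternate.1) (pvDiffWitness_checkAlternate.2.1) (pvDiffWitness_checkAlternate.2.2) ∧ checkAlternate (pvDiffWitness_checkAlternate.1) (pvDiffWitness_checkAlternate.2.1) (pvDiffWitness_checkAlternate.2.2) = pvDiffWitnessOut_checkAlternate.1 ∧ checkAlternate_alt (pvDiffWitness_checkAlternate.1) (pvDiffWitness_checkAlternate.2.1) (pvDiffWitness_checkAlternate.2.2) = pvDiffWitnessOut_checkAlternate.2 ∧ pvDiffWitnessOut_checkAlternate.1 ≠ pvDiffWitnessOut_checkAlternate.2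
def Claim_exact_checkAlternate : Prop := ∀ (string : String) (a : String) (b : String), Dom_checkAlternate string a b → Pre_checkAlternate string a b → D_checkAlternate string a b → checkAlternate string a b ≠ checkAlternate_alt string a b

-- ===== LEMMAS AND PROOFS =====

-- A's loop ignores irrelevant characters
theorem pvGoA_filter (al bl : List Char) (l e : List Char) (cnt : Int) :
    pvGoA al bl l e cnt = pvGoA al bl (l.filter (fun c => [c] == al || [c] == bl)) e cnt := by
  induction l generalizing e cnt with
  | nil => rfl
  | cons c rest ih =>
    by_cases h1 : [c] = al
    · have hf : (c :: rest).filter (fun c => [c] == al || [c] == bl)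
          = c :: rest.filter (fun c => [c] == al || [c] == bl) := by
        simp [h1]
      rw [hf]
      simp only [pvGoA, if_pos h1]
      split_ifs with h
      · rfl
      · exact ih bl (cnt + 1)
    · by_cases h2 : [c] = bl
      · have hf : (c :: rest).filter (fun c => [c] == al || [c] == bl)
            = c :: rest.filter (fun c => [c] == al || [c] == bl) := by
          simp [h2]
        rw [hf]
        simp only [pvGoA, if_neg h1, if_pos h2]
        split_ifs with h
        · rfl
        · exact ih al (cnt + 1)
      · have hf : (c :: rest).filter (fun c => [c] == al || [c] == bl)
            = rest.filter (fun c => [c] == al || [c] == bl) := by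
          simp [h1, h2]
        rw [hf]
        simp only [pvGoA, if_neg h1, if_neg h2]
        exact ih e cnt

-- one step of A's loop on a relevant char: trigger iff the state equals the other pattern
theorem pvGoA_step (al bl : List Char) (hne : al ≠ bl) (c : Char) (rest e : List Char)
    (cnt : Int) (hc : [c] = al ∨ [c] = bl) :
    pvGoA al bl (c :: rest) e cnt
      = if e = (if [c] = al then bl else al) then -1
        else pvGoA al bl rest (if [c] = al then bl else al) (cnt + 1) := by
  rcases hc with h | h
  · simp [pvGoA, h]
  · have h' : ¬ [c] = al := fun hh => hne (hh.symm.trans h)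
    have hne' : ¬ bl = al := fun hh => hne hh.symm
    simp [pvGoA, h, hne']

-- the post-state map is injective on relevant chars
theorem pvOther_inj (al bl : List Char) (hne : al ≠ bl) (p c : Char)
    (hp : [p] = al ∨ [p] = bl) (hc : [c] = al ∨ [c] = bl) :
    ((if [p] = al then bl else al) = (if [c] = al then bl else al)) ↔ p = c := by
  constructor
  · intro h
    split_ifs at h with h1 h2 h2
    · have : [p] = [c] := h1.trans h2.symm
      simpa using this
    · exact absurd h.symm hne
    · exact absurd h hne
    · have hp' : [p] = bl := hp.resolve_left h1
      have hc' : [c] = bl := hc.resolve_left h2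
      have : [p] = [c] := hp'.trans hc'.symm
      simpa using this
  · rintro rfl; rfl

-- the run lemma: on an all-relevant list, starting from the state left by a relevant char p
theorem pvGoA_run (al bl : List Char) (hne : al ≠ bl) :
    ∀ (rel : List Char), (∀ c ∈ rel, [c] = al ∨ [c] = bl) →
    ∀ (p : Char), ([p] = al ∨ [p] = bl) → ∀ (cnt : Int),
    pvGoA al bl rel (if [p] = al then bl else al) cnt
      = if pvHasAdjEq (p :: rel) then -1 else cnt + rel.length := by
  intro rel
  induction rel with
  | nil => intro _ p _ cnt; simp [pvGoA, pvHasAdjEq]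
  | cons c rest ih =>
    intro hall p hp cnt
    have hc : [c] = al ∨ [c] = bl := hall c (by simp)
    have hrest : ∀ d ∈ rest, [d] = al ∨ [d] = bl := fun d hd => hall d (List.mem_cons_of_mem _ hd)
    rw [pvGoA_step al bl hne c rest _ cnt hc]
    by_cases hpc : p = c
    · subst hpc
      simp [pvHasAdjEq]
    · have hcond : ¬ ((if [p] = al then bl else al) = (if [c] = al then bl else al)) := by
        rw [pvOther_inj al bl hne p c hp hc]; exact hpc
      rw [if_neg hcond, ih hrest c hc (cnt + 1)]
      have hadj : pvHasAdjEq (p :: c :: rest) = pvHasAdjEq (c :: rest) := by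
        simp [pvHasAdjEq, hpc]
      rw [hadj]
      by_cases hA : pvHasAdjEq (c :: rest)
      · rw [if_pos hA, if_pos hA]
      · rw [if_neg hA, if_neg hA]
        push_cast [List.length_cons]
        omega

-- all-relevant lists are constant when one pattern is empty (helper for the collision case)
theorem pvAllEq_hasAdj (c : Char) : ∀ (rest : List Char), (∀ d ∈ rest, d = c) → rest ≠ [] →
    pvHasAdjEq (c :: rest) = true := by
  intro rest hall hne
  cases rest with
  | nil => exact absurd rfl hne
  | cons d r => simp [pvHasAdjEq, hall d (by simp)]

-- A = B at the level of char lists, outside the D_ region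
theorem pvMain (al bl sl : List Char) (hne : al ≠ bl)
    (hnd : ¬ ((al = [] ∧ (sl.filter (fun c => [c] == bl)).length = 1)
            ∨ (bl = [] ∧ (sl.filter (fun c => [c] == al)).length = 1))) :
    pvGoA al bl sl [] 0
      = (if pvHasAdjEq (sl.filter (fun c => [c] == al || [c] == bl)) then -1
         else ((sl.filter (fun c => [c] == al || [c] == bl)).length : Int)) := by
  rw [pvGoA_filter]
  have hallrel : ∀ c ∈ sl.filter (fun c => [c] == al || [c] == bl), [c] = al ∨ [c] = bl := by
    intro c hc
    have := List.of_mem_filter hc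
    simpa using this
  cases hrelc : sl.filter (fun c => [c] == al || [c] == bl) with
  | nil => simp [pvGoA, pvHasAdjEq]
  | cons c rest =>
    rw [hrelc] at hallrel
    have hc : [c] = al ∨ [c] = bl := hallrel c (by simp)
    have hrest : ∀ d ∈ rest, [d] = al ∨ [d] = bl := fun d hd => hallrel d (List.mem_cons_of_mem _ hd)
    rw [pvGoA_step al bl hne c rest _ 0 hc]
    by_cases h0 : ([] : List Char) = (if [c] = al then bl else al)
    · -- collision: the '' sentinel equals the other pattern; show B returns -1 too
      rw [if_pos h0]
      have hkey : (∀ d ∈ rest, d = c) ∧ rest ≠ [] := by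
        rcases hc with h | h
        · -- [c] = al, so bl = []
          have hb0 : bl = [] := by rw [if_pos h] at h0; exact h0.symm
          constructor
          · intro d hd
            rcases hrest d hd with hh | hh
            · have : [d] = [c] := hh.trans h.symm
              simpa using this
            · rw [hb0] at hh; simp at hh
          · intro hr0
            apply hnd; right
            refine ⟨hb0, ?_⟩
            have hfil : sl.filter (fun x => [x] == al || [x] == bl)
                = sl.filter (fun x => [x] == al) := by
              apply List.filter_congr
              intro x _
              simp [hb0]
            rw [← hfil, hrelc, hr0]
            rfl
        · -- [c] = bl, so al = []
          have h' : ¬ [c] = al := fun hh => hne (hh.symm.trans h)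
          have ha0 : al = [] := by rw [if_neg h'] at h0; exact h0.symm
          constructor
          · intro d hd
            rcases hrest d hd with hh | hh
            · rw [ha0] at hh; simp at hh
            · have : [d] = [c] := hh.trans h.symm
              simpa using this
          · intro hr0
            apply hnd; left
            refine ⟨ha0, ?_⟩
            have hfil : sl.filter (fun x => [x] == al || [x] == bl)
                = sl.filter (fun x => [x] == bl) := by
              apply List.filter_congr
              intro x _
              simp [ha0]
            rw [← hfil, hrelc, hr0]
            rfl
      rw [pvAllEq_hasAdj c rest hkey.1 hkey.2]
      rfl
    · rw [if_neg h0, pvGoA_run al bl hne rest hrest c hc (0 + 1)]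
      by_cases hA : pvHasAdjEq (c :: rest)
      · rw [if_pos hA, if_pos hA]
      · rw [if_neg hA, if_neg hA]
        push_cast [List.length_cons]
        omega

-- inside D_: A returns -1 while B returns 1, at the level of char lists
theorem pvMainD (al bl sl : List Char)
    (hd : (al = [] ∧ (sl.filter (fun c => [c] == bl)).length = 1)
        ∨ (bl = [] ∧ (sl.filter (fun c => [c] == al)).length = 1)) :
    pvGoA al bl sl [] 0 = -1
      ∧ (if pvHasAdjEq (sl.filter (fun c => [c] == al || [c] == bl)) then (-1 : Int)
         else ((sl.filter (fun c => [c] == al || [c] == bl)).length : Int)) = 1 := by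
  rw [pvGoA_filter]
  rcases hd with ⟨ha0, hlen⟩ | ⟨hb0, hlen⟩
  · have hfil : sl.filter (fun x => [x] == al || [x] == bl)
        = sl.filter (fun x => [x] == bl) := by
      apply List.filter_congr
      intro x _
      simp [ha0]
    obtain ⟨d, hd1⟩ := List.length_eq_one_iff.mp hlen
    have hdb : [d] = bl := by
      have hm : d ∈ sl.filter (fun x => [x] == bl) := by rw [hd1]; simp
      have := List.of_mem_filter hm
      simpa using this
    rw [hfil, hd1]
    constructor
    · simp [pvGoA, hdb, ha0]
    · simp [pvHasAdjEq]
  · have hfil : sl.filter (fun x => [x] == al || [x] == bl)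
        = sl.filter (fun x => [x] == al) := by
      apply List.filter_congr
      intro x _
      simp [hb0]
    obtain ⟨d, hd1⟩ := List.length_eq_one_iff.mp hlen
    have hda : [d] = al := by
      have hm : d ∈ sl.filter (fun x => [x] == al) := by rw [hd1]; simp
      have := List.of_mem_filter hm
      simpa using this
    rw [hfil, hd1]
    constructor
    · simp [pvGoA, hda, hb0]
    · simp [pvHasAdjEq]

-- ===== VERDICT (by name: the statement is the Claim_ definition above) =====
theorem checkAlternate_spec : Claim_unchanged_checkAlternate := by
  intro s a b _ hpre hnd
  unfold Pre_checkAlternate at hpre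
  unfold checkAlternate checkAlternate_alt
  rw [if_neg hpre, if_neg hpre]
  exact pvMain a.toList b.toList s.toList hpre (by
    intro h; exact hnd (by unfold D_checkAlternate; exact h))

theorem checkAlternate_changed : Claim_changed_checkAlternate := by
  unfold Claim_changed_checkAlternate; decide

theorem checkAlternate_tight : Claim_exact_checkAlternate := by
  intro s a b _ hpre hd
  unfold Pre_checkAlternate at hpre
  unfold checkAlternate checkAlternate_alt
  rw [if_neg hpre, if_neg hpre]
  have := pvMainD a.toList b.toList s.toList (by unfold D_checkAlternate at hd; exact hd)
  rw [this.1]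
  intro hcontra
  rw [← hcontra] at this
  exact absurd this.2 (by norm_num)
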